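-- pv_equiv track=rewrite | github.com/slavah8/leetcode | 2255-minimum-swaps-to-group-all-1s-together-ii/2255-minimum-swaps-to-group-all-1s-together-ii.py | minSwaps
-- ===== SOURCE A (Python) =====
-- from typing import List
--
-- def minSwaps(nums: List[int]) -> int:
--     ones = 0
--     if nums == [0]:
--         return 0
--     for x in nums:
--         if x == 1:
--             ones += 1
--
--     arr = nums + nums
--     N = len(nums)
--     zeroes_in_window = 0
--     ans = N
--     left = 0
--     for right in range(2 * N):
--         if arr[right] == 0:
--             zeroes_in_window += 1
--
--         while right - left + 1 > ones:
--             left_num = arr[left]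
--             if left_num == 0:
--                 zeroes_in_window -= 1
--             left += 1
--
--         if right - left + 1 == ones and left < N:
--             ans = min(ans, zeroes_in_window)
--
--         if left >= N:
--             break
--     return ans
-- ===== SOURCE B (Python) =====
-- from typing import List
--
-- def minSwaps(nums: List[int]) -> int:
--     n = len(nums)
--     k = nums.count(1)
--     if k == 0:
--         return 0
--     return min(sum(1 for t in range(k) if nums[(j + t) % n] == 0)
--                for j in range(n))
-- ===== Notes on version B (the rewrite author's own statement) =====
-- stated objective: simpler
-- what changed: Replaces the doubled-array two-pointer sweep with break logic by a direct minimum, over the n circular window starts, of the zero-count of the length-k window computed with modular indexing (k = number of ones), with an early return 0 when there are no ones.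
-- intended difference: On one-element lists [x] with x not 0 and not 1, A returns 1 (its ans=N initial value survives because the break fires before any window update) while B returns 0, the intended answer since an array with no ones needs 0 swaps (A itself special-cases [0] to 0). — e.g. on minSwaps([2]): A returns 1, B returns 0
import Mathlib
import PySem

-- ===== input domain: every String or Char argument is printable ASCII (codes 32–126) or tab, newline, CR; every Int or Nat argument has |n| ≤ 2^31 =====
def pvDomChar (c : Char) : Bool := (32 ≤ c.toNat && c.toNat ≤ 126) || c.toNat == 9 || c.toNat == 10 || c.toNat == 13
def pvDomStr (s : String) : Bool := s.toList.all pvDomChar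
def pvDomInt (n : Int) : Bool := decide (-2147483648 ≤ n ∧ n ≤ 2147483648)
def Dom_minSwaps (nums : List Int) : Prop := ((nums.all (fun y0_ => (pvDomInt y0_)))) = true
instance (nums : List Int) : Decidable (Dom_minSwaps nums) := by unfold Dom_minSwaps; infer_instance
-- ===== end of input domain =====

-- B replaces A's doubled-array two-pointer sweep by a direct minimum over the n circular
-- windows of length k (k = number of ones), computed with modular indexing; simpler, not faster.

-- ===== PORT A =====
-- the inner 'while right - left + 1 > ones' loop; the fuel passed at the call site is the
-- exact number of iterations (each iteration shrinks the window by one), so it only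
-- totalises the loop and never changes its result
def pvWhileA (arr : List Int) (ones right : Int) : Nat → Int → Int → Int × Int
  | 0, left, zeroes => (left, zeroes)
  | fuel + 1, left, zeroes =>
    if right - left + 1 > ones then
      let leftNum := (PySem.List.pyGet? arr left).getD 0
      pvWhileA arr ones right fuel (left + 1) (if leftNum == 0 then zeroes - 1 else zeroes)
    else (left, zeroes)

-- the 'for right in range(2*N)' loop with state (zeroes_in_window, ans, left); the break is
-- the early return of ans'
def pvGoA (arr : List Int) (N ones : Int) : List Int → Int → Int → Int → Int
  | [], _zeroes, ans, _left => ans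
  | right :: rs, zeroes, ans, left =>
    let z1 := if (PySem.List.pyGet? arr right).getD 0 == 0 then zeroes + 1 else zeroes
    let p := pvWhileA arr ones right (right - left + 1 - ones).toNat left z1
    let ans' := if right - p.1 + 1 == ones ∧ p.1 < N then min ans p.2 else ans
    if p.1 ≥ N then ans' else pvGoA arr N ones rs p.2 ans' p.1

def minSwaps (nums : List Int) : Int :=
  if nums == [0] then 0
  else
    let ones := nums.foldl (fun o x => if x == 1 then o + 1 else o) 0
    let arr := nums ++ nums
    let N : Int := (nums.length : Int)
    pvGoA arr N ones (PySem.List.pyRange 0 (2 * N) 1) 0 N 0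

-- ===== PORT B =====
-- sum(1 for t in range(k) if nums[(j + t) % n] == 0)
def pvZerosAt (nums : List Int) (n k j : Int) : Int :=
  ((PySem.List.pyRange 0 k 1).map
    (fun t => if (PySem.List.pyGet? nums (PySem.Int.mod (j + t) n)).getD 0 == 0 then (1 : Int) else 0)).sum

def minSwaps_alt (nums : List Int) : Int :=
  let n : Int := (nums.length : Int)
  let k : Int := (PySem.List.count nums 1 : Int)
  if k == 0 then 0
  else
    match PySem.List.min? ((PySem.List.pyRange 0 n 1).map (fun j => pvZerosAt nums n k j)) (fun x => x) with
    | some v => v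
    | none => 0

-- ===== PRECONDITION & SPEC =====
-- On one-element lists [x] with x ∉ {0,1}, A returns 1 (its initial ans = N survives because the
-- break fires before any window update) while B returns 0, the intended answer since an array with
-- no ones needs 0 swaps (A itself special-cases [0] to 0).
def D_minSwaps (nums : List Int) : Prop := nums.length = 1 ∧ nums.getD 0 0 ≠ 0 ∧ nums.getD 0 0 ≠ 1
instance (nums : List Int) : Decidable (D_minSwaps nums) := by unfold D_minSwaps; infer_instance

def Spec_minSwaps (nums : List Int) (out : Int) : Prop := ¬ D_minSwaps nums → out = minSwaps_alt nums
instance (nums : List Int) (out : Int) : Decidable (Spec_minSwaps nums out) := by unfold Spec_minSwaps; infer_instance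

def pvDiffWitness_minSwaps : List Int := [2]
def pvDiffWitnessOut_minSwaps : Int × Int := (1, 0)

-- ===== CLAIM (what is proved, stated in full; the proofs are below) =====
def Claim_unchanged_minSwaps : Prop := ∀ (nums : List Int), Dom_minSwaps nums → Spec_minSwaps nums (minSwaps nums)
def Claim_changed_minSwaps : Prop := Dom_minSwaps (pvDiffWitness_minSwaps) ∧ D_minSwaps (pvDiffWitness_minSwaps) ∧ minSwaps (pvDiffWitness_minSwaps) = pvDiffWitnessOut_minSwaps.1 ∧ minSwaps_alt (pvDiffWitness_minSwaps) = pvDiffWitnessOut_minSwaps.2 ∧ pvDiffWitnessOut_minSwaps.1 ≠ pvDiffWitnessOut_minSwaps.2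
def Claim_exact_minSwaps : Prop := ∀ (nums : List Int), Dom_minSwaps nums → D_minSwaps nums → minSwaps nums ≠ minSwaps_alt nums

-- ===== LEMMAS AND PROOFS =====

-- zseg nums a len = number of zeros in (nums++nums)[a : a+len]
def zseg (nums : List Int) (a len : Nat) : Int :=
  (((((nums ++ nums).drop a)).take len).count 0 : Int)

lemma zseg_succ_right (nums : List Int) (a l : Nat) (h : a + l < (nums ++ nums).length) :
    zseg nums a (l + 1) = zseg nums a l + (if (nums ++ nums).getD (a + l) 0 = 0 then 1 else 0) := by
  have hl : l < ((nums ++ nums).drop a).length := by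
    rw [List.length_drop]; omega
  simp only [zseg, List.take_add_one, List.getElem?_eq_getElem hl, List.getD_eq_getElem?_getD,
    List.getElem?_eq_getElem h, List.getElem_drop, Option.toList_some, Option.getD_some,
    List.count_append]
  by_cases hz : (nums ++ nums)[a + l] = 0 <;> simp [hz]
lemma zseg_succ_left (nums : List Int) (a l : Nat) (h : a < (nums ++ nums).length) :
    zseg nums a (l + 1) = (if (nums ++ nums).getD a 0 = 0 then 1 else 0) + zseg nums (a + 1) l := by
  have hd : (nums ++ nums).drop a = (nums ++ nums)[a] :: (nums ++ nums).drop (a + 1) :=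
    (List.drop_eq_getElem_cons h)
  rw [zseg, zseg, hd, List.take_succ_cons, List.count_cons,
    List.getD_eq_getElem?_getD, List.getElem?_eq_getElem h]
  by_cases hz : (nums ++ nums)[a] = 0 <;> simp [hz] <;> omega
lemma zseg_le (nums : List Int) (a len : Nat) : zseg nums a len ≤ (len : Int) := by
  have h1 := List.count_le_length (l := (((nums ++ nums).drop a).take len)) (a := (0:Int))
  have h2 := List.length_take_le len ((nums ++ nums).drop a)
  unfold zseg
  omega
lemma while_step (nums : List Int) (kn r : Nat) (hr : r < 2 * nums.length) :
    pvWhileA (nums ++ nums) (kn : Int) (r : Int)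
      (((r : Int) - ((r - kn : Nat) : Int) + 1 - (kn : Int)).toNat)
      ((r - kn : Nat) : Int) (zseg nums (r - kn) (min r kn + 1))
    = (((r + 1 - kn : Nat) : Int), zseg nums (r + 1 - kn) (min (r + 1) kn)) := by
  by_cases hcase : r < kn
  · have h1 : r - kn = 0 := by omega
    have h2 : ((r : Int) - ((r - kn : Nat) : Int) + 1 - (kn : Int)).toNat = 0 := by
      simp [h1]; omega
    have h3 : r + 1 - kn = 0 := by omega
    have h4 : min r kn + 1 = min (r + 1) kn := by omega
    rw [h2, h1, h3, ← h4]
    rfl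
  · rw [not_lt] at hcase
    have h1 : ((r - kn : Nat) : Int) = (r : Int) - (kn : Int) := by omega
    have h2 : ((r : Int) - ((r - kn : Nat) : Int) + 1 - (kn : Int)).toNat = 1 := by omega
    have hmin : min r kn = kn := by omega
    have hmin' : min (r + 1) kn = kn := by omega
    rw [h2, hmin, hmin']
    show (if (r : Int) - ((r - kn : Nat):Int) + 1 > kn then _ else _) = _
    rw [if_pos (by omega)]
    have hidx : r - kn < (nums ++ nums).length := by simp; omega
    have hget : (PySem.List.pyGet? (nums ++ nums) ((r - kn : Nat) : Int)).getD 0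
        = (nums ++ nums).getD (r - kn) 0 := by
      rw [PySem.List.pyGet?_natCast, List.getD_eq_getElem?_getD]
    simp only [pvWhileA, hget]
    have hnk : r + 1 - kn = (r - kn) + 1 := by omega
    by_cases hz : (nums ++ nums).getD (r - kn) 0 = 0 <;>
      simp [zseg_succ_left nums (r - kn) kn hidx, hnk] <;> omega

-- the main characterisation of A's loop
lemma goA_eq (nums : List Int) (n kn : Nat) (hn : 1 ≤ n) (hkn : kn ≤ n)
    (hnL : n = nums.length) :
    ∀ (c r : Nat), 1 ≤ c → r + c = n + kn → ∀ (m : Nat), c ≤ m → ∀ (ans : Int),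
      pvGoA (nums ++ nums) (n : Int) (kn : Int) ((List.range' r m).map Int.ofNat)
        (zseg nums (r - kn) (min r kn)) ans ((r - kn : Nat) : Int)
      = ((List.range' (r + 1 - kn) (n - (r + 1 - kn))).map (fun j => zseg nums j kn)).foldl min ans := by
  intro c
  induction c with
  | zero => omega
  | succ c ih =>
    intro r _ hrc m hm ans
    obtain ⟨m', rfl⟩ : ∃ m', m = m' + 1 := ⟨m - 1, by omega⟩
    rw [List.range'_succ, List.map_cons]
    have hr2 : r < 2 * nums.length := by omega
    have hget : (PySem.List.pyGet? (nums ++ nums) (Int.ofNat r)).getD 0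
        = (nums ++ nums).getD r 0 := by
      rw [Int.ofNat_eq_natCast, PySem.List.pyGet?_natCast, List.getD_eq_getElem?_getD]
    have hrlen : (r - kn) + min r kn < (nums ++ nums).length := by simp; omega
    have hz1 : (if (PySem.List.pyGet? (nums ++ nums) (Int.ofNat r)).getD 0 == 0
          then zseg nums (r - kn) (min r kn) + 1 else zseg nums (r - kn) (min r kn))
        = zseg nums (r - kn) (min r kn + 1) := by
      rw [hget, zseg_succ_right nums (r - kn) (min r kn) hrlen]
      have : (r - kn) + min r kn = r := by omega
      rw [this]
      simp only [beq_iff_eq]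
      by_cases hz : (nums ++ nums).getD r 0 = 0
      · rw [if_pos hz, if_pos hz]
      · rw [if_neg hz, if_neg hz, add_zero]
    show pvGoA _ _ _ _ _ _ _ = _
    rw [pvGoA]
    simp only [hz1]
    have hofnat : (Int.ofNat r) = ((r : Nat) : Int) := rfl
    rw [hofnat, while_step nums kn r hr2]
    simp only [beq_iff_eq]
    by_cases hbrk : r + 1 - kn ≥ n
    · -- last iteration: the break fires, no update (left' = N)
      rw [if_pos (by exact_mod_cast Int.ofNat_le.mpr hbrk)]
      rw [if_neg (by omega)]
      have h0 : n - (r + 1 - kn) = 0 := by omega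
      rw [h0]
      simp
    · rw [if_neg (by omega)]
      have hc1 : 1 ≤ c := by omega
      have := ih (r + 1) hc1 (by omega) m' (by omega)
      rw [this]
      by_cases hk : kn ≤ r + 1
      · rw [if_pos (by constructor <;> omega)]
        have hmin : min (r + 1) kn = kn := by omega
        rw [hmin]
        have hsplit : n - (r + 1 - kn) = (n - (r + 1 + 1 - kn)) + 1 := by omega
        have hsucc : r + 1 + 1 - kn = (r + 1 - kn) + 1 := by omega
        rw [hsplit, List.range'_succ, List.map_cons, List.foldl_cons, hsucc]
      · rw [if_neg (by omega)]
        have h1 : r + 1 - kn = 0 := by omega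
        have h2 : r + 1 + 1 - kn = 0 := by omega
        rw [h1, h2]
lemma minSwaps_eq_fold (nums : List Int) (hne : nums ≠ []) (h0 : nums ≠ [0]) :
    minSwaps nums
      = ((List.range' (1 - nums.count 1) (nums.length - (1 - nums.count 1))).map
          (fun j => zseg nums j (nums.count 1))).foldl min (nums.length : Int) := by
  have hb : (nums == [0]) = false := by simp [h0]
  rw [minSwaps]
  simp only [hb, Bool.false_eq_true, if_false]
  have hones : nums.foldl (fun o x => if x == 1 then o + 1 else o) 0
      = ((nums.count 1 : Nat) : Int) := by
    rw [PySem.List.foldl_beq_add_one]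
    simp
  have hrange : PySem.List.pyRange 0 (2 * (nums.length : Int)) 1
      = (List.range' 0 (2 * nums.length)).map Int.ofNat := by
    rw [PySem.List.pyRange_one]
    have : ((2 * (nums.length : Int) - 0)).toNat = 2 * nums.length := by omega
    rw [this, List.range_eq_range']
    simp [Int.ofNat_eq_natCast]
  rw [hones, hrange]
  have h1 : 1 ≤ nums.length := by
    cases nums with
    | nil => exact absurd rfl hne
    | cons a t => simp
  have := goA_eq nums nums.length (nums.count 1) h1 (List.count_le_length) rfl
    (nums.length + nums.count 1) 0 (by omega) (by omega) (2 * nums.length)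
    (by have := List.count_le_length (l := nums) (a := (1 : Int)); omega)
    (nums.length : Int)
  simpa [zseg] using this

lemma zseg_as_sum (nums : List Int) (j l : Nat) (h : j + l ≤ (nums ++ nums).length) :
    zseg nums j l
      = ((List.range l).map (fun t => if (nums ++ nums).getD (j + t) 0 = 0 then (1 : Int) else 0)).sum := by
  induction l with
  | zero => simp [zseg]
  | succ l ih =>
    rw [List.range_succ, List.map_append, List.sum_append,
      zseg_succ_right nums j l (by omega), ih (by omega)]
    simp

lemma getD_append_mod (nums : List Int) (i : Nat) (h : i < 2 * nums.length) :
    (nums ++ nums).getD i 0 = nums.getD (i % nums.length) 0 := by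
  rcases lt_or_ge i nums.length with hlt | hge
  · rw [List.getD_append _ _ _ _ hlt, Nat.mod_eq_of_lt hlt]
  · rw [List.getD_append_right _ _ _ _ hge, Nat.mod_eq_sub_mod hge,
      Nat.mod_eq_of_lt (by omega)]

lemma zerosAt_eq (nums : List Int) (j : Nat) (hj : j < nums.length)
    (hk : nums.count 1 ≤ nums.length) :
    pvZerosAt nums (nums.length : Int) ((nums.count 1 : Nat) : Int) ((j : Nat) : Int)
      = zseg nums j (nums.count 1) := by
  rw [pvZerosAt, PySem.List.pyRange_one]
  have h1 : (((nums.count 1 : Nat) : Int) - 0).toNat = nums.count 1 := by omega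
  rw [h1, List.map_map,
    zseg_as_sum nums j (nums.count 1) (by simp; omega)]
  congr 1
  apply List.map_congr_left
  intro t ht
  have ht' : t < nums.count 1 := List.mem_range.mp ht
  have hc : ((j : Int) + (0 + (t : Int))) = ((j + t : Nat) : Int) := by push_cast; ring
  simp only [Function.comp_apply, hc, PySem.Int.mod_natCast, PySem.List.pyGet?_natCast]
  rw [getD_append_mod nums (j + t) (by omega), ← List.getD_eq_getElem?_getD]
  by_cases hz : nums.getD ((j + t) % nums.length) 0 = 0
  · rw [if_pos hz, if_pos (by exact_mod_cast beq_iff_eq.mpr hz)]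
  · rw [if_neg hz, if_neg (by simpa using hz)]

lemma foldl_min_replicate_zero (m : Nat) (a : Int) :
    List.foldl min a (List.replicate (m + 1) 0) = min a 0 := by
  induction m generalizing a with
  | zero => rfl
  | succ m ih =>
    rw [List.replicate_succ, List.foldl_cons, ih]
    omega

lemma minSwaps_spec' : ∀ (nums : List Int), ¬ D_minSwaps nums → minSwaps nums = minSwaps_alt nums := by
  intro nums hD
  by_cases hnil : nums = []
  · subst hnil; decide
  by_cases h0 : nums = [0]
  · subst h0; decide
  have h1 : 1 ≤ nums.length := List.length_pos_iff.mpr hnil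
  have hkle : nums.count 1 ≤ nums.length := List.count_le_length
  rw [minSwaps_eq_fold nums hnil h0]
  by_cases hk0 : nums.count 1 = 0
  · by_cases hn1 : nums.length = 1
    · exfalso
      match nums, hn1, hk0, h0, hD with
      | [x], _, hk0, h0, hD =>
        refine hD ⟨rfl, ?_, ?_⟩
        · intro hx
          exact h0 (by simpa using hx)
        · intro hx
          simp at hx
          simp [hx] at hk0
    · have hmap : (List.range' (1 - nums.count 1) (nums.length - (1 - nums.count 1))).map
          (fun j => zseg nums j (nums.count 1)) = List.replicate (nums.length - 1) 0 := by
        rw [hk0]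
        have : ∀ j ∈ List.range' 1 (nums.length - 1), zseg nums j 0 = (fun _ => (0:Int)) j := by
          intro j _; simp [zseg]
        rw [Nat.sub_zero, List.map_congr_left this, List.map_const']
        simp
      rw [hmap]
      have h2 : nums.length - 1 = (nums.length - 2) + 1 := by omega
      rw [h2, foldl_min_replicate_zero]
      have : min ((nums.length : Nat) : Int) 0 = 0 := by omega
      rw [this, minSwaps_alt]
      simp [hk0]
  · -- at least one 1: both sides are the minimum over the n circular windows
    have hzero : 1 - nums.count 1 = 0 := by omega
    rw [hzero, Nat.sub_zero]
    rw [minSwaps_alt]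
    simp only [PySem.List.count_eq]
    rw [if_neg (by simpa using hk0)]
    have hlist : (PySem.List.pyRange 0 (nums.length : Int) 1).map
        (fun j => pvZerosAt nums (nums.length : Int) ((nums.count 1 : Nat) : Int) j)
        = (List.range' 0 nums.length).map (fun j => zseg nums j (nums.count 1)) := by
      rw [PySem.List.pyRange_one]
      have ht : (((nums.length : Nat) : Int) - 0).toNat = nums.length := by omega
      rw [ht, List.map_map, ← List.range_eq_range']
      apply List.map_congr_left
      intro j hj
      have hj' : j < nums.length := List.mem_range.mp hj
      simp only [Function.comp_apply, zero_add]
      exact zerosAt_eq nums j hj' hkle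
    rw [hlist]
    have hn2 : nums.length = (nums.length - 1) + 1 := by omega
    rw [hn2, List.range'_succ, List.map_cons, PySem.List.min?_id_cons, List.foldl_cons]
    have hle : zseg nums 0 (nums.count 1) ≤ ((nums.length : Nat) : Int) := by
      have := zseg_le nums 0 (nums.count 1); omega
    have : min ((nums.length : Nat) : Int) (zseg nums 0 (nums.count 1))
        = zseg nums 0 (nums.count 1) := by omega
    rw [← hn2] at *
    rw [this]

-- ===== VERDICT (by name: the statement is the Claim_ definition above) =====
theorem minSwaps_spec : Claim_unchanged_minSwaps := by
  intro nums _ hD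
  exact minSwaps_spec' nums hD

theorem minSwaps_changed : Claim_changed_minSwaps := by
  unfold Claim_changed_minSwaps; decide

theorem minSwaps_tight : Claim_exact_minSwaps := by
  unfold Claim_exact_minSwaps
  intro nums _ hDnum
  obtain ⟨hlen, hx0, hx1⟩ := hDnum
  match nums, hlen, hx0, hx1 with
  | [x], _, hx0, hx1 =>
    simp only [List.getD_cons_zero] at hx0 hx1
    have hA : minSwaps [x] = 1 := by
      have hr : PySem.List.pyRange 0 (2 * ((1 : Nat) : Int)) 1 = [0, 1] := by decide
      rw [minSwaps]
      rw [if_neg (by simp [hx0])]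
      simp only [List.length_cons, List.length_nil, List.foldl_cons, List.foldl_nil,
        List.cons_append, List.nil_append]
      rw [if_neg (by simpa using hx1)]
      rw [hr]
      simp [pvGoA, pvWhileA, PySem.List.pyGet?]
    have hB : minSwaps_alt [x] = 0 := by
      rw [minSwaps_alt]
      simp [hx1]
    rw [hA, hB]
    decide
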